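-- pv_equiv track=rewrite | github.com/Domik44/BP | scrapers/scraper_Trebon.py | convert_commas
-- ===== SOURCE A (Python) =====
-- def convert_commas(str, delims):
--     priznak = False
--     newStr = ""
--     delim1 = delims[0]
--     if len(delims) == 1:
--         delim2 = delim1
--     else:
--         delim2 = delims[1]
--
--     for i in str:
--         if i == delim1 or i == delim2:
--             priznak = not priznak
--         if i == ',' and priznak:
--             i = ';'
--         newStr += i
--
--     newStr = newStr.replace('; ', ';')
--     newStr = newStr.replace(' : ', ':')
--     return newStr
-- ===== SOURCE B (Python) =====
-- def convert_commas(str, delims):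
--     d1 = delims[0]
--     d2 = d1 if len(delims) == 1 else delims[1]
--     # split into alternating text / delimiter tokens
--     toks = []
--     cur = ""
--     for ch in str:
--         if ch == d1 or ch == d2:
--             toks.append(cur)
--             toks.append(ch)
--             cur = ""
--         else:
--             cur += ch
--     toks.append(cur)
--     # text tokens sit at even indices; every second text segment lies inside
--     # a delimited region, so exactly the tokens with k % 4 == 2 get the rewrite
--     out = [t.replace(',', ';') if k % 4 == 2 else t for k, t in enumerate(toks)]
--     return ''.join(out).replace('; ', ';').replace(' : ', ':')
-- ===== Notes on version B (the rewrite author's own statement) =====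
-- stated objective: alternative
-- what changed: B splits the string into alternating text/delimiter tokens and bulk-rewrites ','->';' in exactly the text tokens at index k % 4 == 2 (the segments inside a region), instead of A's char-by-char loop carrying a running toggle flag; Pre_ excludes empty delims (IndexError) and delimiter lists whose active delimiter is the comma itself, a degenerate choice on which rewriting or keeping the delimiter comma are both defensible.
-- outside the precondition, e.g. on convert_commas('a,b,c', [',']): A returns 'a;b,c', B returns 'a,b,c'; on convert_commas('x', []): A raises IndexError, B raises IndexError
import Mathlib
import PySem

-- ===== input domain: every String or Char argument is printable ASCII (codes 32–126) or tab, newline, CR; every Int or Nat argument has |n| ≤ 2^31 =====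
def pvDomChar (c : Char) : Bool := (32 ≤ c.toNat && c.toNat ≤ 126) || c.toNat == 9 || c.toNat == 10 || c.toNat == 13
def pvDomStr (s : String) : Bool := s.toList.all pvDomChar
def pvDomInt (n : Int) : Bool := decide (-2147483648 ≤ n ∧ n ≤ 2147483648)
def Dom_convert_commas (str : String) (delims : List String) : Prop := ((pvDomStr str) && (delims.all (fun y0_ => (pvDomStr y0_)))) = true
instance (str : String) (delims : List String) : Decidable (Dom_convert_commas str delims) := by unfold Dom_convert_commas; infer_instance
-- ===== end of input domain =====

-- B splits the string into alternating text/delimiter tokens and rewrites whole tokens from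
-- their index, instead of A's char-by-char loop with a running toggle flag (objective: alternative).

-- ===== PORT A =====
-- A's char loop: toggle the flag on a delimiter char, then rewrite ',' to ';' under the flag.
def convert_commas (str : String) (delims : List String) : String :=
  let delim1 := (PySem.List.pyGet? delims 0).getD ""   -- delims[0]; some under Pre_
  let delim2 := if PySem.List.len delims == 1 then delim1
                else (PySem.List.pyGet? delims 1).getD ""
  let st := str.toList.foldl (fun (st : Bool × List Char) i =>
      let priznak := if String.ofList [i] == delim1 || String.ofList [i] == delim2 then !st.1 else st.1
      let i' := if i == ',' && priznak then ';' else i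
      (priznak, st.2 ++ [i'])) (false, ([] : List Char))
  let newStr := PySem.Chars.replace st.2 "; ".toList ";".toList
  String.ofList (PySem.Chars.replace newStr " : ".toList ":".toList)

-- ===== PORT B =====
-- tokenizer: alternating text / delimiter tokens
def cc_tokenize (d1 d2 : String) : List Char → List Char → List String
  | [], cur => [String.ofList cur]
  | ch :: rest, cur =>
    if String.ofList [ch] == d1 || String.ofList [ch] == d2 then
      String.ofList cur :: String.ofList [ch] :: cc_tokenize d1 d2 rest []
    else
      cc_tokenize d1 d2 rest (cur ++ [ch])

-- one enumerated token: exactly the text tokens with k % 4 == 2 get the rewrite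
def cc_render (p : Int × String) : String :=
  if PySem.Int.mod p.1 4 == 2 then
    String.ofList (PySem.Chars.replace p.2.toList ",".toList ";".toList)
  else p.2

def convert_commas_alt (str : String) (delims : List String) : String :=
  let d1 := (PySem.List.pyGet? delims 0).getD ""
  let d2 := if PySem.List.len delims == 1 then d1
            else (PySem.List.pyGet? delims 1).getD ""
  let toks := cc_tokenize d1 d2 str.toList []
  let out := (PySem.List.enumerate toks 0).map cc_render
  let res := PySem.Str.join "" out
  String.ofList (PySem.Chars.replace
    (PySem.Chars.replace res.toList "; ".toList ";".toList) " : ".toList ":".toList)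

-- ===== PRECONDITION & SPEC =====
-- Pre_ excludes delims = [], on which A raises IndexError at delims[0], and delimiter lists whose
-- active delimiter is the comma itself — a degenerate choice of delimiter on which rewriting or
-- keeping the delimiter comma are both defensible (A rewrites the opening one but not the closing
-- one; B keeps delimiters verbatim).
def Pre_convert_commas (str : String) (delims : List String) : Prop :=
  delims ≠ [] ∧ "," ∉ delims.take 2
instance (str : String) (delims : List String) : Decidable (Pre_convert_commas str delims) := by
  unfold Pre_convert_commas; infer_instance

def pvWitness_convert_commas : String × List String := ("a, (b, c), d", ["(", ")"])

def Spec_convert_commas (str : String) (delims : List String) (out : String) : Prop := out = convert_commas_alt str delims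
instance (str : String) (delims : List String) (out : String) : Decidable (Spec_convert_commas str delims out) := by unfold Spec_convert_commas; infer_instance

-- ===== CLAIM (what is proved, stated in full; the proofs are below) =====
def Claim_equal_convert_commas : Prop := ∀ (str : String) (delims : List String), Dom_convert_commas str delims → Pre_convert_commas str delims → Spec_convert_commas str delims (convert_commas str delims)

-- ===== LEMMAS AND PROOFS =====

-- A's loop as a stateless recursion on the char list (flag passed down).
def ccA (d1 d2 : String) : List Char → Bool → List Char
  | [], _ => []
  | c :: rest, p =>
    let p' := if String.ofList [c] == d1 || String.ofList [c] == d2 then !p else p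
    let c' := if c == ',' && p' then ';' else c
    c' :: ccA d1 d2 rest p'

theorem ccA_foldl (d1 d2 : String) (cs : List Char) (p : Bool) (acc : List Char) :
    cs.foldl (fun (st : Bool × List Char) i =>
      let priznak := if String.ofList [i] == d1 || String.ofList [i] == d2 then !st.1 else st.1
      let i' := if i == ',' && priznak then ';' else i
      (priznak, st.2 ++ [i'])) (p, acc)
    = ((cs.foldl (fun b i => if String.ofList [i] == d1 || String.ofList [i] == d2 then !b else b) p),
       acc ++ ccA d1 d2 cs p) := by
  induction cs generalizing p acc with
  | nil => simp [ccA]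
  | cons c rest ih =>
    simp only [List.foldl_cons]
    rw [ih]
    simp [ccA]

theorem replace_go_comma (fuel : Nat) (l acc : List Char) (h : l.length ≤ fuel) :
    PySem.Chars.replace.go [','] [';'] fuel l acc
      = acc.reverse ++ l.map (fun c => if c == ',' then ';' else c) := by
  induction fuel generalizing l acc with
  | zero =>
    interval_cases h' : l.length
    · simp_all [List.length_eq_zero_iff.mp h', PySem.Chars.replace.go]
  | succ fuel ih =>
    cases l with
    | nil => simp [PySem.Chars.replace.go]
    | cons c t =>
      rw [PySem.Chars.replace.go]
      by_cases hc : c = ','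
      · subst hc
        rw [if_pos (show [','].isPrefixOf (',' :: t) = true from
          List.isPrefixOf_iff_prefix.mpr ⟨t, rfl⟩)]
        rw [ih _ _ (by simpa using Nat.le_of_succ_le_succ h)]
        simp
      · rw [if_neg (fun hp => hc (by
          rcases List.isPrefixOf_iff_prefix.mp hp with ⟨r, hr⟩
          exact (List.cons.injEq ',' r c t).mp hr |>.1 |>.symm))]
        rw [ih _ _ (Nat.le_of_succ_le_succ h)]
        simp [hc]

theorem replace_comma_map' (cs : List Char) :
    PySem.Chars.replace cs [','] [';'] = cs.map (fun c => if c == ',' then ';' else c) := by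
  rw [PySem.Chars.replace]
  simp only [List.isEmpty]
  exact replace_go_comma cs.length cs [] le_rfl

theorem join_empty_cons (x : List Char) (l : List (List Char)) :
    PySem.Chars.join [] (x :: l) = x ++ PySem.Chars.join [] l := by
  cases l <;> simp [PySem.Chars.join, List.intercalate]

theorem render_even (j : Nat) (t : String) :
    cc_render (((2*j : Nat) : Int), t)
      = if j % 2 = 1 then String.ofList (PySem.Chars.replace t.toList ",".toList ";".toList) else t := by
  simp only [cc_render, PySem.Int.mod_eq_emod_of_pos (show (0:Int) < 4 by norm_num)]
  by_cases hj : j % 2 = 1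
  · have e : 2 * (j:Int) % 4 = 2 := by omega
    simp [e, hj]
  · have hj0 : j % 2 = 0 := Nat.mod_two_ne_one.mp hj
    have e : 2 * (j:Int) % 4 = 0 := by omega
    simp [e, hj]

theorem render_odd (j : Nat) (t : String) :
    cc_render (((2*j : Nat) : Int) + 1, t) = t := by
  simp only [cc_render, PySem.Int.mod_eq_emod_of_pos (show (0:Int) < 4 by norm_num)]
  have e : ¬ ((2 * (j:Int) + 1) % 4 = 2) := by omega
  simp [e]

-- the key invariant: rendering the tokenizer's output enumerated from index 2*j equals
-- the pending segment (comma-rewritten when j is odd) followed by A's loop output at parity j;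
-- needs that neither active delimiter is "," (Pre_).
theorem cc_main (d1 d2 : String) (hd1 : d1 ≠ ",") (hd2 : d2 ≠ ",") (cs cur : List Char) (j : Nat) :
    PySem.Chars.join []
        (((PySem.List.enumerate (cc_tokenize d1 d2 cs cur) (((2*j : Nat) : Int))).map cc_render).map String.toList)
      = (if j % 2 = 1 then cur.map (fun c => if c == ',' then ';' else c) else cur)
        ++ ccA d1 d2 cs (j % 2 == 1) := by
  induction cs generalizing cur j with
  | nil =>
    simp only [cc_tokenize, PySem.List.enumerate_cons, PySem.List.enumerate_nil, List.map, ccA,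
      List.append_nil]
    rw [join_empty_cons, PySem.Chars.join_nil, List.append_nil, render_even]
    by_cases hj : j % 2 = 1
    · simp [hj, String.toList_ofList, replace_comma_map']
    · simp [hj, String.toList_ofList]
  | cons c rest ih =>
    by_cases hd : (String.ofList [c] == d1 || String.ofList [c] == d2) = true
    · have hc : (c == ',') = false := by
        have hd' := hd
        simp only [Bool.or_eq_true, beq_iff_eq] at hd'
        simp only [beq_eq_false_iff_ne, ne_eq]
        intro h; subst h
        rcases hd' with h1 | h1
        · exact hd1 h1.symm
        · exact hd2 h1.symm
      simp only [cc_tokenize, hd, if_pos, PySem.List.enumerate_cons, List.map]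
      rw [join_empty_cons, join_empty_cons, render_even, render_odd]
      have hcast : ((2*j : Nat) : Int) + 1 + 1 = ((2*(j+1) : Nat) : Int) := by push_cast; ring
      rw [hcast, ih [] (j+1)]
      simp only [ccA, hd, if_pos]
      have hparity : ((j+1) % 2 == 1) = !(j % 2 == 1) := by
        rcases Nat.mod_two_eq_zero_or_one j with h | h <;> simp [h, Nat.add_mod]
      rw [hparity]
      by_cases hj : j % 2 = 1
      · simp [hj, hc, String.toList_ofList, replace_comma_map']
      · simp [hj, hc, String.toList_ofList]
    · simp only [cc_tokenize, hd, if_neg, Bool.not_eq_true]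
      rw [ih (cur ++ [c]) j]
      simp only [ccA, hd, if_neg, Bool.not_eq_true]
      by_cases hj : j % 2 = 1
      · simp [hj]
      · simp [Nat.mod_two_ne_one.mp hj]

theorem cc_main_zero (d1 d2 : String) (hd1 : d1 ≠ ",") (hd2 : d2 ≠ ",") (cs : List Char) :
    PySem.Chars.join "".toList
        (((PySem.List.enumerate (cc_tokenize d1 d2 cs []) 0).map cc_render).map String.toList)
      = ccA d1 d2 cs false := by
  have h := cc_main d1 d2 hd1 hd2 cs [] 0
  have e : ((2*0 : Nat) : Int) = 0 := by norm_num
  rw [e] at h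
  simpa using h

-- ===== VERDICT (by name: the statement is the Claim_ definition above) =====
theorem convert_commas_spec : Claim_equal_convert_commas := by
  intro s delims _ hpre
  obtain ⟨hne, hmem⟩ := hpre
  unfold Spec_convert_commas convert_commas convert_commas_alt
  simp only [ccA_foldl, List.nil_append]
  refine congrArg (fun l => String.ofList (PySem.Chars.replace
    (PySem.Chars.replace l "; ".toList ";".toList) " : ".toList ":".toList)) ?_
  rw [PySem.Str.toList_join]
  refine (cc_main_zero _ _ ?_ ?_ _).symm
  · cases delims with
    | nil => exact absurd rfl hne
    | cons a rest =>
      simp only [PySem.List.pyGet?_zero_cons, Option.getD_some]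
      intro h
      exact hmem (by simp [h, List.take])
  · cases delims with
    | nil => exact absurd rfl hne
    | cons a rest =>
      cases rest with
      | nil =>
        have hlen : (PySem.List.len [a] == 1) = true := by simp [PySem.List.len]
        simp only [hlen, if_pos, PySem.List.pyGet?_zero_cons, Option.getD_some]
        intro h
        exact hmem (by simp [h, List.take])
      | cons b t =>
        have hlen : (PySem.List.len (a :: b :: t) == 1) = false := by
          simp [PySem.List.len]; omega
        have h1 : (PySem.List.pyGet? (a :: b :: t) 1).getD "" = b := by simp
        simp only [hlen, Bool.false_eq_true, if_false, h1]
        intro h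
        exact hmem (by simp [h, List.take])
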